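-- pv_equiv track=rewrite | github.com/bagython/harbour.space | lectures/01/exercises/problems.py | sum_until_negative
-- ===== SOURCE A (Python) =====
-- def sum_until_negative(numbers: list[int]) -> int:
--     """Return sum of numbers until the first negative value (exclusive)."""
--
--     total = 0
--
--     for i in numbers:
--         if i < 0:
--             break
--         else:
--             total += i
--
--     return total
-- ===== SOURCE B (Python) =====
-- def sum_until_negative(numbers: list[int]) -> int:
--     """Return sum of numbers until the first negative value (exclusive)."""
--     idx = next((i for i, v in enumerate(numbers) if v < 0), len(numbers))
--     return sum(numbers[:idx])
-- ===== Notes on version B (the rewrite author's own statement) =====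
-- stated objective: alternative
-- what changed: Replaces the single accumulate-with-break loop by a two-stage decomposition: first find the index of the first negative element (default len), then sum the prefix slice before it.
import Mathlib
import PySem

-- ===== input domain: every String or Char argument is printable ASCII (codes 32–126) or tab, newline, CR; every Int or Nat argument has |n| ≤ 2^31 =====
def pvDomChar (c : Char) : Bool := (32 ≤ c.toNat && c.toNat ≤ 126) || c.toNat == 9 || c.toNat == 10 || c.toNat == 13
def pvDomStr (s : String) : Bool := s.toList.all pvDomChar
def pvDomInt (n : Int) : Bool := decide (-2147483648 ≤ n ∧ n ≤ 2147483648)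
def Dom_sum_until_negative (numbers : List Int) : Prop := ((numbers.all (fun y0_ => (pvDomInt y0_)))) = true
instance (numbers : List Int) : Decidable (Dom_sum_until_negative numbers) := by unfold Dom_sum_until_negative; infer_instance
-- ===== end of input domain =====

-- ===== PORT A =====
-- loop with accumulator and break, transliterated as recursion over the list
def sumUntilNegGo (total : Int) : List Int → Int
  | [] => total
  | i :: rest => if i < 0 then total else sumUntilNegGo (total + i) rest

def sum_until_negative (numbers : List Int) : Int := sumUntilNegGo 0 numbers

-- ===== PORT B =====
-- index of the first negative element, defaulting to the length
def firstNegIdx : List Int → Nat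
  | [] => 0
  | v :: rest => if v < 0 then 0 else 1 + firstNegIdx rest

-- numbers[:idx] with 0 ≤ idx is List.take idx; sum(...) is foldl (+) 0
def sum_until_negative_alt (numbers : List Int) : Int :=
  (numbers.take (firstNegIdx numbers)).foldl (· + ·) 0

-- ===== PRECONDITION & SPEC =====
def Spec_sum_until_negative (numbers : List Int) (out : Int) : Prop := out = sum_until_negative_alt numbers
instance (numbers : List Int) (out : Int) : Decidable (Spec_sum_until_negative numbers out) := by unfold Spec_sum_until_negative; infer_instance

-- ===== CLAIM (what is proved, stated in full; the proofs are below) =====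
def Claim_equal_sum_until_negative : Prop := ∀ (numbers : List Int), Dom_sum_until_negative numbers → Spec_sum_until_negative numbers (sum_until_negative numbers)

-- ===== LEMMAS AND PROOFS =====

-- ===== VERDICT (by name: the statement is the Claim_ definition above) =====
theorem foldl_add_shift (a : Int) (l : List Int) :
    l.foldl (· + ·) a = a + l.foldl (· + ·) 0 := by
  induction l generalizing a with
  | nil => simp
  | cons x xs ih => simp [List.foldl, ih (a + x), ih x]; ring

theorem go_eq_alt (l : List Int) (total : Int) :
    sumUntilNegGo total l = total + (l.take (firstNegIdx l)).foldl (· + ·) 0 := by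
  induction l generalizing total with
  | nil => simp [sumUntilNegGo, firstNegIdx]
  | cons x xs ih =>
    by_cases h : x < 0
    · simp [sumUntilNegGo, firstNegIdx, h]
    · simp [sumUntilNegGo, firstNegIdx, h, Nat.add_comm 1, List.take_succ_cons, ih,
        foldl_add_shift x]
      ring

theorem sum_until_negative_spec : Claim_equal_sum_until_negative := by
  intro numbers _
  show sum_until_negative numbers = sum_until_negative_alt numbers
  simpa [sum_until_negative, sum_until_negative_alt] using go_eq_alt numbers 0
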